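-- pv_equiv track=rewrite | github.com/agent0ai/agent-zero | agents/health_advisor/tools/health_log_routine_build.py | _build_fillable_table
-- ===== SOURCE A (Python) =====
-- def _normalize_exercise_name(name: str) -> str:
--     """Normalize for fuzzy matching (lowercase, collapse spaces)."""
--     return " ".join(name.lower().split())
--
-- def _best_match(exercise: str, table: dict) -> tuple | None:
--     """Find best matching row in table by exercise name."""
--     ex_norm = _normalize_exercise_name(exercise)
--     # Exact match first
--     for k, v in table.items():
--         if _normalize_exercise_name(k) == ex_norm:
--             return (k, v)
--     # Partial match (ex in key or key in ex)
--     for k, v in table.items():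
--         kn = _normalize_exercise_name(k)
--         if ex_norm in kn or kn in ex_norm:
--             return (k, v)
--     return None
--
-- def _build_fillable_table(
--     exercises: list[tuple[str, str]], table: dict, date_str: str
-- ) -> str:
--     """Build markdown table: Exercise | Sets | Target Reps | Weight | Actual Reps | Notes."""
--     lines = [
--         "| Exercise                              | Sets | Target Reps | Weight (kg/lb)      | Actual Reps | Notes |",
--         "|---------------------------------------|------|-------------|---------------------|-------------|-------|",
--     ]
--     for sets_reps, ex_name in exercises:
--         match = _best_match(ex_name, table)
--         if match:
--             key, (_, sets, reps, weight, notes) = match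
--             target = sets_reps if sets_reps else reps
--         else:
--             key = ex_name
--             target = sets_reps or "-"
--             sets = ""
--             reps = ""
--             weight = ""
--             notes = ""
--         ex_pad = key[:38].ljust(38)
--         st_pad = str(sets)[:6].ljust(6)
--         rp_pad = str(target)[:22].ljust(22)
--         wt_pad = str(weight)[:20].ljust(20)
--         lines.append(f"| {ex_pad} | {st_pad} | {rp_pad} | {wt_pad} |             |       |")
--     return "\n".join(lines)
-- ===== SOURCE B (Python) =====
-- def _normalize(name):
--     return " ".join(name.lower().split())
--
--
-- def _match_row(exn, table):
--     """One pass: return the first exact match immediately; otherwise the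
--     first partial match (stashed, never overwritten), or None."""
--     partial = None
--     for k, v in table.items():
--         kn = _normalize(k)
--         if kn == exn:
--             return (k, v)
--         if partial is None and (exn in kn or kn in exn):
--             partial = (k, v)
--     return partial
--
--
-- def _pad(s, w):
--     t = s[:w]
--     return t + " " * (w - len(t))
--
--
-- def _build_fillable_table(exercises, table, date_str):
--     header = [
--         "| Exercise                              | Sets | Target Reps | Weight (kg/lb)      | Actual Reps | Notes |",
--         "|---------------------------------------|------|-------------|---------------------|-------------|-------|",
--     ]
--
--     def render(item):
--         sets_reps, ex_name = item
--         m = _match_row(_normalize(ex_name), table)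
--         if m is None:
--             key, sets, target, weight = ex_name, "", (sets_reps or "-"), ""
--         else:
--             key, (_, sets, reps, weight, _notes) = m
--             target = sets_reps if sets_reps else reps
--         cols = " | ".join([_pad(key, 38), _pad(sets, 6), _pad(target, 22), _pad(weight, 20)])
--         return "| " + cols + " |             |       |"
--
--     return "\n".join(header + [render(it) for it in exercises])
-- ===== Notes on version B (the rewrite author's own statement) =====
-- stated objective: alternative
-- what changed: The matcher is one pass over table.items() (first exact key returns immediately, the first partial match is stashed and returned only if no exact exists) instead of two sequential scans, and the table is built by mapping a row renderer over the exercises and joining header ++ rows (with a shared truncate-and-pad helper and a ' | '.join of the four columns) instead of mutating a lines list in a loop with inline f-string padding.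
import Mathlib
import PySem

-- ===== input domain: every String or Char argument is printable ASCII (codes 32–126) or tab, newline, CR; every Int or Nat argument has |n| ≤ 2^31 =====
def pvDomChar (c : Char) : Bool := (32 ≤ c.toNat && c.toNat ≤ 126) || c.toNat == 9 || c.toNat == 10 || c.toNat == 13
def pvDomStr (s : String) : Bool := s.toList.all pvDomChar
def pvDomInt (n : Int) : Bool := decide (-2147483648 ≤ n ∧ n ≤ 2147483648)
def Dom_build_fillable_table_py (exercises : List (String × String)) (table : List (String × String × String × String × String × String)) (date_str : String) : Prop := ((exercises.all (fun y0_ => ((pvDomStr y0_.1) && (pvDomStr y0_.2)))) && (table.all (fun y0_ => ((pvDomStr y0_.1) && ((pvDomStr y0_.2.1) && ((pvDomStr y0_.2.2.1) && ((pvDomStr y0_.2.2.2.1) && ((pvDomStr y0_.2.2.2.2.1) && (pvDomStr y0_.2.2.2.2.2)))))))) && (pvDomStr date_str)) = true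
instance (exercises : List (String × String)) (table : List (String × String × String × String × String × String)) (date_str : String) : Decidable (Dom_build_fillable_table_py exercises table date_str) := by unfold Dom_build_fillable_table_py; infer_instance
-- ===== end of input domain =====

-- B replaces A's two sequential scans in _best_match by one pass that returns the first exact
-- match immediately and stashes the first partial match, and builds the table by mapping a row
-- renderer over the exercises (join of header ++ rows) instead of a mutating lines loop (objective: alternative).

-- ===== PORT A =====

-- " ".join(name.lower().split())
def pvNormA (name : String) : String :=
  PySem.Str.join " " (PySem.Str.split₀ (PySem.Str.lower name))

-- first loop of _best_match: exact match
def pvScanExact (exn : String) :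
    List (String × String × String × String × String × String) →
    Option (String × String × String × String × String × String)
  | [] => none
  | (k, v) :: t => if pvNormA k = exn then some (k, v) else pvScanExact exn t

-- second loop of _best_match: partial match (ex in key or key in ex)
def pvScanPartial (exn : String) :
    List (String × String × String × String × String × String) →
    Option (String × String × String × String × String × String)
  | [] => none
  | (k, v) :: t =>
      let kn := pvNormA k
      if PySem.Str.isIn exn kn || PySem.Str.isIn kn exn then some (k, v)
      else pvScanPartial exn t

def pvBestMatch (exercise : String) (d : PySem.Dict String (String × String × String × String × String)) :
    Option (String × String × String × String × String × String) :=
  let exn := pvNormA exercise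
  match pvScanExact exn d.items with
  | some r => some r
  | none => pvScanPartial exn d.items

-- s.ljust(w): hand port (Python pads with spaces to w code points; exact — len is the code-point count)
def pvLjust (s : String) (w : Nat) : String :=
  String.ofList (s.toList ++ List.replicate (w - s.toList.length) ' ')

-- the body of A's for-loop: one appended line (str(x) on a str is x and is dropped)
def pvRowA (d : PySem.Dict String (String × String × String × String × String))
    (item : String × String) : String :=
  let sets_reps := item.1
  let ex_name := item.2
  match pvBestMatch ex_name d with
  | some (key, _, sets, reps, weight, _notes) =>
      let target := if sets_reps ≠ "" then sets_reps else reps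
      let ex_pad := pvLjust (PySem.Str.slice key none (some 38)) 38
      let st_pad := pvLjust (PySem.Str.slice sets none (some 6)) 6
      let rp_pad := pvLjust (PySem.Str.slice target none (some 22)) 22
      let wt_pad := pvLjust (PySem.Str.slice weight none (some 20)) 20
      "| " ++ ex_pad ++ " | " ++ st_pad ++ " | " ++ rp_pad ++ " | " ++ wt_pad ++ " |             |       |"
  | none =>
      let key := ex_name
      let target := if sets_reps ≠ "" then sets_reps else "-"
      let sets := ""
      let weight := ""
      let ex_pad := pvLjust (PySem.Str.slice key none (some 38)) 38
      let st_pad := pvLjust (PySem.Str.slice sets none (some 6)) 6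
      let rp_pad := pvLjust (PySem.Str.slice target none (some 22)) 22
      let wt_pad := pvLjust (PySem.Str.slice weight none (some 20)) 20
      "| " ++ ex_pad ++ " | " ++ st_pad ++ " | " ++ rp_pad ++ " | " ++ wt_pad ++ " |             |       |"

def build_fillable_table_py (exercises : List (String × String)) (table : List (String × String × String × String × String × String)) (date_str : String) : String :=
  -- lines = the two header rows; the loop appends one row per exercise; table is the dict argument
  PySem.Str.join "\n"
    (exercises.foldl (fun acc x => acc ++ [pvRowA (PySem.Dict.ofList table) x])
      ["| Exercise                              | Sets | Target Reps | Weight (kg/lb)      | Actual Reps | Notes |",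
       "|---------------------------------------|------|-------------|---------------------|-------------|-------|"])

-- ===== PORT B =====

def pvNormB (s : String) : String :=
  PySem.Str.join " " (PySem.Str.split₀ (PySem.Str.lower s))

-- one pass: first exact wins immediately; first partial is stashed and never overwritten
def pvMatchRow (exn : String) :
    List (String × String × String × String × String × String) →
    Option (String × String × String × String × String × String) →
    Option (String × String × String × String × String × String)
  | [], part => part
  | (k, v) :: t, part =>
      let kn := pvNormB k
      if kn = exn then some (k, v)
      else pvMatchRow exn t
        (if part.isNone && (PySem.Str.isIn exn kn || PySem.Str.isIn kn exn) then some (k, v) else part)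

-- _pad(s, w) = s[:w] + " " * (w - len(s[:w]))
def pvPad (s : String) (w : Nat) : String :=
  let t := s.toList.take w
  String.ofList (t ++ List.replicate (w - t.length) ' ')

def pvRenderB (d : PySem.Dict String (String × String × String × String × String))
    (item : String × String) : String :=
  let sets_reps := item.1
  let ex_name := item.2
  let fields : String × String × String × String :=
    match pvMatchRow (pvNormB ex_name) d.items none with
    | none => (ex_name, "", (if sets_reps ≠ "" then sets_reps else "-"), "")
    | some (key, _, sets, reps, weight, _notes) =>
        (key, sets, (if sets_reps ≠ "" then sets_reps else reps), weight)
  let cols := PySem.Str.join " | "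
    [pvPad fields.1 38, pvPad fields.2.1 6, pvPad fields.2.2.1 22, pvPad fields.2.2.2 20]
  "| " ++ cols ++ " |             |       |"

def build_fillable_table_py_alt (exercises : List (String × String)) (table : List (String × String × String × String × String × String)) (date_str : String) : String :=
  PySem.Str.join "\n"
    (["| Exercise                              | Sets | Target Reps | Weight (kg/lb)      | Actual Reps | Notes |",
      "|---------------------------------------|------|-------------|---------------------|-------------|-------|"]
     ++ exercises.map (pvRenderB (PySem.Dict.ofList table)))

-- ===== PRECONDITION & SPEC =====
def Spec_build_fillable_table_py (exercises : List (String × String)) (table : List (String × String × String × String × String × String)) (date_str : String) (out : String) : Prop := out = build_fillable_table_py_alt exercises table date_str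
instance (exercises : List (String × String)) (table : List (String × String × String × String × String × String)) (date_str : String) (out : String) : Decidable (Spec_build_fillable_table_py exercises table date_str out) := by unfold Spec_build_fillable_table_py; infer_instance

-- ===== CLAIM (what is proved, stated in full; the proofs are below) =====
def Claim_equal_build_fillable_table_py : Prop := ∀ (exercises : List (String × String)) (table : List (String × String × String × String × String × String)) (date_str : String), Dom_build_fillable_table_py exercises table date_str → Spec_build_fillable_table_py exercises table date_str (build_fillable_table_py exercises table date_str)

-- ===== LEMMAS AND PROOFS =====

theorem pvNormB_eq : pvNormB = pvNormA := rfl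

-- the one-pass scan computes: first exact if any, else the stash, else the first partial
theorem pvMatchRow_eq (exn : String)
    (l : List (String × String × String × String × String × String))
    (part : Option (String × String × String × String × String × String)) :
    pvMatchRow exn l part =
      match pvScanExact exn l with
      | some r => some r
      | none => match part with
                | some p => some p
                | none => pvScanPartial exn l := by
  induction l generalizing part with
  | nil => cases part <;> simp [pvMatchRow, pvScanExact, pvScanPartial]
  | cons kv t ih =>
    obtain ⟨k, v⟩ := kv
    simp only [pvMatchRow, pvScanExact, pvScanPartial, pvNormB_eq]
    by_cases hx : pvNormA k = exn
    · simp [hx]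
    · simp only [hx, if_false, ih]
      cases part with
      | some p => simp
      | none =>
        cases pvScanExact exn t with
        | some r => simp
        | none => split_ifs <;> simp_all

theorem pvPad_eq (s : String) (w : Nat) :
    pvLjust (PySem.Str.slice s none (some (w : Int))) w = pvPad s w := by
  have h : (PySem.Str.slice s none (some (w : Int))).toList = s.toList.take w := by
    simp [PySem.Str.toList_slice, PySem.Chars.slice_eq_listSlice, PySem.List.slice_to_natCast]
  simp [pvLjust, pvPad, h]

theorem pvJoin4 (a b c d : String) :
    PySem.Str.join " | " [a, b, c, d] = a ++ " | " ++ b ++ " | " ++ c ++ " | " ++ d := by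
  have h : (" | " : String).toList = [' ', '|', ' '] := rfl
  apply String.ext
  simp [PySem.Str.join, PySem.Chars.join, List.intercalate, ← h, List.intersperse]

theorem pvRow_eq (d : PySem.Dict String (String × String × String × String × String))
    (item : String × String) : pvRowA d item = pvRenderB d item := by
  obtain ⟨sets_reps, ex_name⟩ := item
  have hm : pvMatchRow (pvNormB ex_name) d.items none = pvBestMatch ex_name d := by
    rw [pvMatchRow_eq, pvNormB_eq, pvBestMatch]
  rw [pvRenderB]
  simp only [hm]
  cases hb : pvBestMatch ex_name d with
  | none =>
      simp only [pvRowA, hb]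
      rw [show ((38 : Int)) = ((38 : Nat) : Int) by norm_num,
          show ((6 : Int)) = ((6 : Nat) : Int) by norm_num,
          show ((22 : Int)) = ((22 : Nat) : Int) by norm_num,
          show ((20 : Int)) = ((20 : Nat) : Int) by norm_num]
    
      rw [pvPad_eq, pvPad_eq, pvPad_eq, pvPad_eq, pvJoin4]
      apply String.ext
      simp [String.toList_append]
  | some r =>
      obtain ⟨key, x, sets, reps, weight, notes⟩ := r
      simp only [pvRowA, hb]
      rw [show ((38 : Int)) = ((38 : Nat) : Int) by norm_num,
          show ((6 : Int)) = ((6 : Nat) : Int) by norm_num,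
          show ((22 : Int)) = ((22 : Nat) : Int) by norm_num,
          show ((20 : Int)) = ((20 : Nat) : Int) by norm_num]
      rw [pvPad_eq, pvPad_eq, pvPad_eq, pvPad_eq, pvJoin4]
      apply String.ext
      simp [String.toList_append]

-- ===== VERDICT (by name: the statement is the Claim_ definition above) =====
theorem build_fillable_table_py_spec : Claim_equal_build_fillable_table_py := by
  intro exercises table date_str _
  unfold Spec_build_fillable_table_py build_fillable_table_py build_fillable_table_py_alt
  rw [PySem.List.foldl_append_singleton_eq_map]
  have h : pvRowA (PySem.Dict.ofList table) = pvRenderB (PySem.Dict.ofList table) :=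
    funext (pvRow_eq _)
  rw [List.cons_append, List.cons_append, List.nil_append, h]
  rfl
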